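-- pv_equiv track=rewrite | github.com/rajvirvyas/School-Report-Maker | processing_helpers.py | get_all_the_scores_text
-- ===== SOURCE A (Python) =====
-- def get_all_the_scores_text(all_page_lines, stop_phrase):
--     """Collect all text until stop phrase is found"""
--     collected_lines = []
--     for page in all_page_lines:
--         for line in page:
--             if stop_phrase in line:
--                 return collected_lines
--             collected_lines.append(line)
--     return collected_lines  # If phrase not found
-- ===== SOURCE B (Python) =====
-- def get_all_the_scores_text(all_page_lines, stop_phrase):
--     """Collect all text until stop phrase is found"""
--     flat = [line for page in all_page_lines for line in page]
--     cut = next((i for i, line in enumerate(flat) if stop_phrase in line), len(flat))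
--     return flat[:cut]
-- ===== Notes on version B (the rewrite author's own statement) =====
-- stated objective: idiomatic
-- what changed: B works in two staged passes with no accumulator: it flattens the pages, locates the cut position (index of the first line containing the stop phrase, or the length if absent) with next(enumerate(...)), and returns the slice flat[:cut], instead of A's nested loops appending line by line with an early return.
import Mathlib
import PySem

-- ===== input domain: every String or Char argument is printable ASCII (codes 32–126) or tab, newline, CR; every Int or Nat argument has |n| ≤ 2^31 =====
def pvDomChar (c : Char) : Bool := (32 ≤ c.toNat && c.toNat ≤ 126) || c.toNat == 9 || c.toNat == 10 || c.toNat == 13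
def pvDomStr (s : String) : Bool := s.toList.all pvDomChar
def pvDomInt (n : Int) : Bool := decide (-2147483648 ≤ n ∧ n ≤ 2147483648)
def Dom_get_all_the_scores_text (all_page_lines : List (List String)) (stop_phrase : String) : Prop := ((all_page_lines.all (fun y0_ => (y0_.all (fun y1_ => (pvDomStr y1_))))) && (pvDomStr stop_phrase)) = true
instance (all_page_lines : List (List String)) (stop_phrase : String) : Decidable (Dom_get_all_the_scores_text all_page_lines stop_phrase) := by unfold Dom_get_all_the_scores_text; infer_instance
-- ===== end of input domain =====

-- B flattens the pages, locates the cut index of the first line containing the stop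
-- phrase (defaulting to the length), and returns the slice before it — two staged
-- passes with no accumulator instead of A's nested append-and-early-return loops (idiomatic).

-- ===== PORT A =====
-- inner 'for line in page': Sum.inl = early 'return collected_lines', Sum.inr = fall through with accumulator
def pvAInner (stop_phrase : String) (acc : List String) : List String → (List String ⊕ List String)
  | [] => Sum.inr acc
  | line :: rest =>
    if PySem.Str.isIn stop_phrase line then Sum.inl acc
    else pvAInner stop_phrase (acc ++ [line]) rest

-- outer 'for page in all_page_lines'
def pvAOuter (stop_phrase : String) (acc : List String) : List (List String) → List String
  | [] => acc
  | page :: pages =>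
    match pvAInner stop_phrase acc page with
    | Sum.inl res => res
    | Sum.inr acc' => pvAOuter stop_phrase acc' pages

def get_all_the_scores_text (all_page_lines : List (List String)) (stop_phrase : String) : List String :=
  pvAOuter stop_phrase [] all_page_lines

-- ===== PORT B =====
-- 'next((i for i, line in enumerate(flat) if stop_phrase in line), len(flat))'
def pvFindCut (stop_phrase : String) : List String → Nat
  | [] => 0
  | line :: rest =>
    if PySem.Str.isIn stop_phrase line then 0
    else pvFindCut stop_phrase rest + 1

def get_all_the_scores_text_alt (all_page_lines : List (List String)) (stop_phrase : String) : List String :=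
  let flat := all_page_lines.flatMap (fun page => page)
  PySem.List.slice flat none (some ((pvFindCut stop_phrase flat : Nat) : Int))

-- ===== PRECONDITION & SPEC =====
def Spec_get_all_the_scores_text (all_page_lines : List (List String)) (stop_phrase : String) (out : List String) : Prop := out = get_all_the_scores_text_alt all_page_lines stop_phrase
instance (all_page_lines : List (List String)) (stop_phrase : String) (out : List String) : Decidable (Spec_get_all_the_scores_text all_page_lines stop_phrase out) := by unfold Spec_get_all_the_scores_text; infer_instance

-- ===== CLAIM =====
def Claim_equal_get_all_the_scores_text : Prop := ∀ (all_page_lines : List (List String)) (stop_phrase : String), Dom_get_all_the_scores_text all_page_lines stop_phrase → Spec_get_all_the_scores_text all_page_lines stop_phrase (get_all_the_scores_text all_page_lines stop_phrase)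

-- ===== LEMMAS AND PROOFS =====

-- proof-only helper: the prefix of a list before its first stop line
def pvCutPrefix (sp : String) : List String → List String
  | [] => []
  | line :: rest =>
    if PySem.Str.isIn sp line then []
    else line :: pvCutPrefix sp rest

-- taking pvFindCut elements is exactly the cut prefix
theorem take_pvFindCut (sp : String) (l : List String) :
    l.take (pvFindCut sp l) = pvCutPrefix sp l := by
  induction l with
  | nil => rfl
  | cons x rest ih =>
    by_cases h : PySem.Str.isIn sp x = true
    · simp only [PySem.Str.isIn] at h
      simp [pvFindCut, pvCutPrefix, PySem.Str.isIn, h]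
    · rw [Bool.not_eq_true] at h
      simp only [PySem.Str.isIn] at h
      simp [pvFindCut, pvCutPrefix, PySem.Str.isIn, h, ih]

-- pvCutPrefix over an append cuts inside the first part iff it contains a stop line
theorem pvCutPrefix_append (sp : String) (p q : List String) :
    pvCutPrefix sp (p ++ q) =
      if p.any (fun l => PySem.Str.isIn sp l) then pvCutPrefix sp p
      else p ++ pvCutPrefix sp q := by
  induction p with
  | nil => simp
  | cons l rest ih =>
    by_cases h : PySem.Str.isIn sp l = true
    · simp only [List.cons_append, pvCutPrefix, List.any_cons, h, Bool.true_or, if_true]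
    · rw [Bool.not_eq_true] at h
      simp only [List.cons_append, pvCutPrefix, List.any_cons, h, Bool.false_or,
        Bool.false_eq_true, if_false, ih]
      split_ifs <;> rfl

-- A's inner loop: early return with the cut prefix if the page has a stop line,
-- otherwise fall through having appended the whole page
theorem pvAInner_eq (sp : String) (p : List String) : ∀ acc,
    pvAInner sp acc p =
      if p.any (fun l => PySem.Str.isIn sp l) then Sum.inl (acc ++ pvCutPrefix sp p)
      else Sum.inr (acc ++ p) := by
  induction p with
  | nil => simp [pvAInner]
  | cons l rest ih =>
    intro acc
    by_cases h : PySem.Str.isIn sp l = true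
    · simp only [pvAInner, pvCutPrefix, List.any_cons, h, Bool.true_or, if_true, List.append_nil]
    · rw [Bool.not_eq_true] at h
      simp only [pvAInner, pvCutPrefix, List.any_cons, h, Bool.false_or,
        Bool.false_eq_true, if_false, ih]
      split_ifs <;> simp

-- A's outer loop computes acc ++ (cut prefix of the flattened remaining pages)
theorem pvAOuter_eq (sp : String) (ps : List (List String)) : ∀ acc,
    pvAOuter sp acc ps = acc ++ pvCutPrefix sp (ps.flatMap (fun page => page)) := by
  induction ps with
  | nil => simp [pvAOuter, pvCutPrefix]
  | cons p rest ih =>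
    intro acc
    rw [List.flatMap_cons, pvCutPrefix_append]
    show (match pvAInner sp acc p with
          | Sum.inl res => res
          | Sum.inr acc' => pvAOuter sp acc' rest) = _
    rw [pvAInner_eq]
    by_cases h : p.any (fun l => PySem.Str.isIn sp l) = true
    · rw [if_pos h, if_pos h]
    · rw [if_neg h, if_neg h]
      simp [ih]

-- ===== VERDICT =====
theorem get_all_the_scores_text_spec : Claim_equal_get_all_the_scores_text := by
  intro aps sp _
  unfold Spec_get_all_the_scores_text get_all_the_scores_text get_all_the_scores_text_alt
  rw [PySem.List.slice_to_natCast, take_pvFindCut]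
  simpa using pvAOuter_eq sp aps []
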